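-- pv_equiv track=rewrite | github.com/gon2gon2/jungle-week1-4 | week02/괄호변환.py | split_u_v
-- ===== SOURCE A (Python) =====
-- def split_u_v(p):
--     n = len(p)
--     if n == 2:
--         return 2
--
--     for i in range(2,n,2):
--         if p[:i].count('(') == i//2:
--             return i
--     return n
-- ===== SOURCE B (Python) =====
-- def split_u_v(p):
--     bal = 0
--     for i, ch in enumerate(p, 1):
--         bal += 1 if ch == '(' else -1
--         if bal == 0:
--             return i
--     return len(p)
-- ===== Notes on version B (the rewrite author's own statement) =====
-- stated objective: faster
-- what changed: A re-counts the opening brackets of the prefix p[:i] from scratch for every even i (quadratic); B makes a single left-to-right pass keeping a running open/close balance counter and returns the first position where it reaches zero.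
import Mathlib
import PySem

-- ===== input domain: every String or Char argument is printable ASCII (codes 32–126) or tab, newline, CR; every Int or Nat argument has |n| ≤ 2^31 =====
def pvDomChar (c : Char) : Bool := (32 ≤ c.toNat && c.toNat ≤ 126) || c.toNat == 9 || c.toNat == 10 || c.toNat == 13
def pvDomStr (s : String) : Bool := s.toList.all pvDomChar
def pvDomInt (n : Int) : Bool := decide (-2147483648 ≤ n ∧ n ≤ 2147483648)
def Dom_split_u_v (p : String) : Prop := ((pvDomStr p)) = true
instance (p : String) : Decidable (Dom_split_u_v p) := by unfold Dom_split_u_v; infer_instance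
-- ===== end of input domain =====

-- B replaces A's quadratic prefix-recount (p[:i].count for every even i) by one linear pass
-- maintaining a running open/close balance counter; same return value everywhere.

-- ===== PORT A =====
-- for i in range(2, n, 2): if p[:i].count('(') == i//2: return i   — loop as structural recursion over the range list
def splitLoopA (p : String) : List Int → Option Int
  | [] => none
  | i :: rest =>
    if (PySem.Str.count (PySem.Str.slice p none (some i)) "(" : Int) = PySem.Int.floordiv i 2 then some i
    else splitLoopA p rest

def split_u_v (p : String) : Int :=
  let n : Int := PySem.Str.len p
  if n = 2 then 2
  else
    match splitLoopA p (PySem.List.pyRange 2 n 2) with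
    | some i => i
    | none => n

-- ===== PORT B =====
-- for i, ch in enumerate(p, 1): bal += 1 if ch=='(' else -1; if bal == 0: return i   — one pass over the chars
def splitLoopB : List Char → Int → Int → Option Int
  | [], _, _ => none
  | c :: rest, i, bal =>
    let bal' := bal + (if c = '(' then 1 else -1)
    if bal' = 0 then some i else splitLoopB rest (i + 1) bal'

def split_u_v_alt (p : String) : Int :=
  match splitLoopB p.toList 1 0 with
  | some i => i
  | none => PySem.Str.len p

-- ===== PRECONDITION & SPEC =====
def Spec_split_u_v (p : String) (out : Int) : Prop := out = split_u_v_alt p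
instance (p : String) (out : Int) : Decidable (Spec_split_u_v p out) := by unfold Spec_split_u_v; infer_instance

-- ===== CLAIM (what is proved, stated in full; the proofs are below) =====
def Claim_equal_split_u_v : Prop := ∀ (p : String), Dom_split_u_v p → Spec_split_u_v p (split_u_v p)

-- ===== LEMMAS AND PROOFS =====

-- Chars.count with a single-character needle is List.count (specific fact about A's condition)
lemma countGo_singleton (fuel : Nat) : ∀ (l : List Char) (acc : Nat), l.length ≤ fuel →
    PySem.Chars.count.go ['('] fuel l acc = acc + l.count '(' := by
  induction fuel with
  | zero =>
    intro l acc h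
    cases l with
    | nil => simp [PySem.Chars.count.go]
    | cons c t => simp at h
  | succ n ih =>
    intro l acc h
    cases l with
    | nil => simp [PySem.Chars.count.go]
    | cons c t =>
      have ht : t.length ≤ n := by simpa using Nat.lt_succ_iff.mp (by simpa using h)
      simp only [PySem.Chars.count.go, List.isPrefixOf]
      by_cases hc : c = '('
      · simp [hc, ih t (acc + 1) ht]; omega
      · simp [hc, Ne.symm hc, ih t acc ht]

lemma count_singleton_paren (l : List Char) : PySem.Chars.count l ['('] = l.count '(' := by
  simp [PySem.Chars.count, countGo_singleton l.length l 0 le_rfl]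

-- induction forms for range(a, b, 2)
lemma pyRange_two_nil (a b : Int) (h : b ≤ a) : PySem.List.pyRange a b 2 = [] := by
  rw [PySem.List.pyRange_of_pos a b (by norm_num)]
  simp [show ¬ a < b by omega]

lemma pyRange_two_cons (a b : Int) (h : a < b) :
    PySem.List.pyRange a b 2 = a :: PySem.List.pyRange (a + 2) b 2 := by
  rw [PySem.List.pyRange_of_pos a b (by norm_num), PySem.List.pyRange_of_pos (a + 2) b (by norm_num)]
  have h1 : ((b - a + 2 - 1) / 2).toNat = (if a + 2 < b then ((b - (a + 2) + 2 - 1) / 2).toNat else 0) + 1 := by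
    split_ifs with h2 <;> omega
  rw [if_pos h, h1, List.range_succ_eq_map, List.map_cons, List.map_map]
  refine congrArg₂ _ (by ring) ?_
  apply List.map_congr_left; intro k _; simp [Function.comp]; ring

-- A's prefix condition at index pre.length + 2 (p = pre ++ a :: b :: rest)
lemma condA_eq (p : String) (pre rest : List Char) (a b : Char)
    (hp : p.toList = pre ++ a :: b :: rest) :
    ((PySem.Str.count (PySem.Str.slice p none (some ((pre.length : Int) + 2))) "(" : Int)
        = PySem.Int.floordiv ((pre.length : Int) + 2) 2)
      ↔ ((pre ++ [a, b]).count '(' : Int) = ((pre.length + 2) / 2 : Nat) := by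
  have hsl : (PySem.Str.slice p none (some ((pre.length : Int) + 2))).toList = pre ++ [a, b] := by
    have : ((pre.length : Int) + 2) = ((pre.length + 2 : Nat) : Int) := by omega
    rw [PySem.Str.toList_slice, PySem.Chars.slice_eq_listSlice, this,
        PySem.List.slice_to_natCast, hp]
    have h2 : pre ++ a :: b :: rest = (pre ++ [a, b]) ++ rest := by simp
    rw [h2, List.take_left' (by simp)]
  have hc : PySem.Str.count (PySem.Str.slice p none (some ((pre.length : Int) + 2))) "("
      = (pre ++ [a, b]).count '(' := by
    rw [PySem.Str.count, hsl]
    exact count_singleton_paren _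
  have hd : PySem.Int.floordiv ((pre.length : Int) + 2) 2 = ((pre.length + 2) / 2 : Nat) := by
    have : ((pre.length : Int) + 2) = ((pre.length + 2 : Nat) : Int) := by omega
    rw [this]; exact_mod_cast PySem.Int.floordiv_natCast (pre.length + 2) 2
  rw [hc, hd]

-- joint loop invariant: B's scan from position pre.length agrees with A's remaining range scan
theorem key : ∀ (rest : List Char) (p : String) (pre : List Char),
    p.toList = pre ++ rest → 2 ∣ pre.length →
    (match splitLoopB rest ((pre.length : Int) + 1) (2 * (pre.count '(' : Int) - pre.length) with
     | some i => i
     | none => (p.toList.length : Int))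
    = (match splitLoopA p (PySem.List.pyRange ((pre.length : Int) + 2) (p.toList.length : Int) 2) with
       | some i => i
       | none => (p.toList.length : Int))
  | [], p, pre, hp, _ => by
    have hn : p.toList.length = pre.length := by rw [hp]; simp
    rw [pyRange_two_nil _ _ (by exact_mod_cast by omega : (p.toList.length : Int) ≤ (pre.length : Int) + 2)]
    simp [splitLoopA, splitLoopB]
  | [a], p, pre, hp, hpre => by
    have hn : p.toList.length = pre.length + 1 := by rw [hp]; simp
    obtain ⟨k, hk⟩ := hpre
    rw [pyRange_two_nil _ _ (by exact_mod_cast by omega : (p.toList.length : Int) ≤ (pre.length : Int) + 2)]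
    simp only [splitLoopA, splitLoopB]
    rw [if_neg (by split_ifs with h <;> omega)]
  | a :: b :: rest', p, pre, hp, hpre => by
    obtain ⟨k, hk⟩ := hpre
    have hn : p.toList.length = pre.length + 2 + rest'.length := by rw [hp]; simp; omega
    have hcount : ((pre ++ [a, b]).count '(' : Int)
        = (pre.count '(' : Int) + (if a = '(' then 1 else 0) + (if b = '(' then 1 else 0) := by
      simp [List.count_append, List.count_cons]
      split_ifs <;> push_cast <;> ring
    -- unfold B's two steps; the first (odd position) test is never 0
    simp only [splitLoopB]
    rw [if_neg (by split_ifs with h <;> omega)]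
    by_cases hre : rest' = []
    · subst hre
      have h2 : (p.toList.length : Int) = (pre.length : Int) + 2 := by
        simp only [List.length_nil, Nat.add_zero] at hn; omega
      rw [pyRange_two_nil _ _ (by omega)]
      simp only [splitLoopA]
      rw [h2]
      split_ifs <;>
        exact (by omega : ((pre.length : Int) + 1 + 1) = (pre.length : Int) + 2)
    · have hlt : (pre.length : Int) + 2 < (p.toList.length : Int) := by
        have : 0 < rest'.length := List.length_pos_iff.mpr hre
        omega
      rw [pyRange_two_cons _ _ hlt]
      simp only [splitLoopA]
      have hcond := condA_eq p pre rest' a b hp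
      by_cases hc : ((pre ++ [a, b]).count '(' : Int) = ((pre.length + 2) / 2 : Nat)
      · -- A returns pre.length + 2 here; B's balance is 0 at the same position
        rw [if_pos (hcond.mpr hc)]
        have hb : 2 * (pre.count '(' : Int) - (pre.length : Int) + (if a = '(' then 1 else -1)
            + (if b = '(' then 1 else -1) = 0 := by
          have hc2 : 2 * ((pre ++ [a, b]).count '(' : Int) = (pre.length : Int) + 2 := by
            have : ((pre.length + 2) / 2 : Nat) = k + 1 := by omega
            rw [hc, this]; push_cast; omega
          rw [hcount] at hc2
          split_ifs at * <;> omega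
        rw [if_pos (by split_ifs at * <;> omega)]
        show ((pre.length : Int) + 1 + 1) = (pre.length : Int) + 2
        ring
      · rw [if_neg (fun h => hc (hcond.mp h))]
        have hb : 2 * (pre.count '(' : Int) - (pre.length : Int) + (if a = '(' then 1 else -1)
            + (if b = '(' then 1 else -1) ≠ 0 := by
          intro h0
          apply hc
          have : 2 * ((pre ++ [a, b]).count '(' : Int) = (pre.length : Int) + 2 := by
            rw [hcount]; split_ifs at * <;> omega
          have h2 : ((pre.length + 2) / 2 : Nat) = k + 1 := by omega
          rw [h2]; push_cast at this ⊢; omega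
        rw [if_neg (by intro h; exact hb (by split_ifs at * <;> omega))]
        have := key rest' p (pre ++ [a, b]) (by rw [hp]; simp) (by simp only [List.length_append, List.length_cons, List.length_nil]; omega)
        have harg1 : (((pre ++ [a, b]).length : Int) + 1) = (pre.length : Int) + 1 + 1 + 1 := by
          simp only [List.length_append, List.length_cons, List.length_nil]; omega
        have harg2 : 2 * ((pre ++ [a, b]).count '(' : Int) - ((pre ++ [a, b]).length : Int)
            = 2 * (pre.count '(' : Int) - (pre.length : Int) + (if a = '(' then 1 else -1)
              + (if b = '(' then 1 else -1) := by
          rw [hcount]; simp; split_ifs <;> ring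
        have harg3 : (((pre ++ [a, b]).length : Int) + 2) = (pre.length : Int) + 2 + 2 := by
          simp only [List.length_append, List.length_cons, List.length_nil]; omega
        rw [harg1, harg2, harg3] at this
        exact this

-- ===== VERDICT (by name: the statement is the Claim_ definition above) =====
theorem split_u_v_spec : Claim_equal_split_u_v := by
  intro p _
  unfold Spec_split_u_v split_u_v split_u_v_alt
  rw [PySem.Str.len_eq]
  have hk := key p.toList p [] (by simp) (by simp)
  norm_num at hk
  simp only [String.length_toList] at hk ⊢
  by_cases h2 : ((p.length : Nat) : Int) = 2
  · rw [if_pos h2, hk, h2, pyRange_two_nil 2 2 le_rfl]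
    simp [splitLoopA]
  · rw [if_neg h2, hk]
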